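-- pv_equiv track=rewrite | github.com/Musadalancikar/Codeforces-Python | 1472A-CardsforFriends.py | cut_total
-- ===== SOURCE A (Python) =====
-- def cut_total(w,h,n):
--     total = 0
--
--     if w % 2 == 1 and h % 2 == 1 and n == 1:
--         return "YES"
--     else:
--         while True:
--             if w % 2 == 0:
--                 w = int(w / 2)
--                 total += 1
--             elif h % 2 == 0:
--                 h = int(h / 2)
--                 total += 1
--             else:
--                 break
--
--         if 2 ** total >= n:
--             return "YES"
--         else:
--             return "NO"
-- ===== SOURCE B (Python) =====
-- def cut_total(w, h, n):
--     # Each halving doubles the piece count, so the number of pieces obtainable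
--     # is 2**(v2(w)+v2(h)) = lowest-set-bit(w) * lowest-set-bit(h).
--     pieces = (w & -w) * (h & -h)
--     return "YES" if pieces >= n else "NO"
-- ===== Notes on version B (the rewrite author's own statement) =====
-- stated objective: simpler
-- what changed: Replaces the interleaved halving loop, the counter with a final exponentiation, and the redundant both-odd special case by a single closed-form expression: the piece count equals (w & -w) * (h & -h), the product of the lowest set bits.
import Mathlib
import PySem

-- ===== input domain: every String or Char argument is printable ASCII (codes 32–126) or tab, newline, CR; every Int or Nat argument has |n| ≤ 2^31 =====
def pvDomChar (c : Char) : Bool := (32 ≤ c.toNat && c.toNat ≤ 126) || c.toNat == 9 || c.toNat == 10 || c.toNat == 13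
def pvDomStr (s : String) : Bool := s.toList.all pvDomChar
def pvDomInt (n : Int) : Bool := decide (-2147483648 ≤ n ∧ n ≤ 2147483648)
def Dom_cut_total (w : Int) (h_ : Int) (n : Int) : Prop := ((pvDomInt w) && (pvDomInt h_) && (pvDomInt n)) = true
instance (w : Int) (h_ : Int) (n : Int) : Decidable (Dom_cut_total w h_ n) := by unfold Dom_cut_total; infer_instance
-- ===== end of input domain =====

-- B replaces A's halving loop + counter + special case by the closed form
-- (w & -w) * (h & -h); equivalence is proved for nonzero w, h (A loops forever otherwise).

-- ===== PORT A =====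
-- The while loop of A as fuel recursion; on every input admitted by Pre_ (w,h ≠ 0)
-- within Dom (|w|,|h| ≤ 2^31) the loop runs < 64 iterations, so fuel 64 is never
-- exhausted and the recursion is A's loop step for step.  Python's `int(w / 2)` is
-- exact halving of an even int on Dom (floats are exact below 2^53), ported as w / 2.
def cutLoopA : Nat → Int → Int → Nat → Nat
  | 0, _, _, total => total
  | fuel + 1, w, h_, total =>
    if PySem.Int.mod w 2 == 0 then cutLoopA fuel (w / 2) h_ (total + 1)
    else if PySem.Int.mod h_ 2 == 0 then cutLoopA fuel w (h_ / 2) (total + 1)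
    else total

def cut_total (w : Int) (h_ : Int) (n : Int) : String :=
  if PySem.Int.mod w 2 == 1 && PySem.Int.mod h_ 2 == 1 && n == 1 then "YES"
  else
    let total := cutLoopA 64 w h_ 0
    if n ≤ (2 : Int) ^ total then "YES" else "NO"

-- ===== PORT B =====
def cut_total_alt (w : Int) (h_ : Int) (n : Int) : String :=
  let pieces := PySem.Int.band w (-w) * PySem.Int.band h_ (-h_)
  if n ≤ pieces then "YES" else "NO"

-- ===== PRECONDITION & SPEC =====
-- Pre_ excludes w = 0 and h = 0, on which A's while loop never terminates.
def Pre_cut_total (w : Int) (h_ : Int) (n : Int) : Prop := w ≠ 0 ∧ h_ ≠ 0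
instance (w : Int) (h_ : Int) (n : Int) : Decidable (Pre_cut_total w h_ n) := by
  unfold Pre_cut_total; infer_instance

def pvWitness_cut_total : Int × Int × Int := (12, 10, 8)

def Spec_cut_total (w : Int) (h_ : Int) (n : Int) (out : String) : Prop := out = cut_total_alt w h_ n
instance (w : Int) (h_ : Int) (n : Int) (out : String) : Decidable (Spec_cut_total w h_ n out) := by unfold Spec_cut_total; infer_instance

-- ===== CLAIM (what is proved, stated in full; the proofs are below) =====
def Claim_equal_cut_total : Prop := ∀ (w : Int) (h_ : Int) (n : Int), Dom_cut_total w h_ n → Pre_cut_total w h_ n → Spec_cut_total w h_ n (cut_total w h_ n)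

-- ===== LEMMAS AND PROOFS =====

-- lowbit on Nat, as it appears in PySem.Int.band x (-x)
def lowf (m : Nat) : Nat := m - (m &&& (m - 1))

theorem and_pred_of_odd (k : Nat) : (2 * k + 1) &&& (2 * k) = 2 * k := by
  apply Nat.eq_of_testBit_eq
  intro i
  rw [Nat.testBit_and]
  cases i with
  | zero => simp [Nat.testBit_zero, Nat.mul_mod_right]
  | succ i =>
      simp only [Nat.testBit_succ]
      have h1 : (2 * k + 1) / 2 = k := by omega
      have h2 : (2 * k) / 2 = k := by omega
      rw [h1, h2, Bool.and_self]

theorem and_pred_of_even (k : Nat) (hk : 1 ≤ k) :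
    (2 * k) &&& (2 * k - 1) = 2 * (k &&& (k - 1)) := by
  apply Nat.eq_of_testBit_eq
  intro i
  rw [Nat.testBit_and]
  cases i with
  | zero => simp [Nat.testBit_zero, Nat.mul_mod_right]
  | succ i =>
      simp only [Nat.testBit_succ]
      have h1 : (2 * k) / 2 = k := by omega
      have h2 : (2 * k - 1) / 2 = k - 1 := by omega
      have h3 : (2 * (k &&& (k - 1))) / 2 = k &&& (k - 1) := by omega
      rw [h1, h2, h3, Nat.testBit_and]

theorem lowf_odd (k : Nat) : lowf (2 * k + 1) = 1 := by
  unfold lowf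
  have : (2 * k + 1) - 1 = 2 * k := by omega
  rw [this, and_pred_of_odd]
  omega

theorem lowf_even (k : Nat) (hk : 1 ≤ k) : lowf (2 * k) = 2 * lowf k := by
  unfold lowf
  rw [and_pred_of_even k hk]
  have : k &&& (k - 1) ≤ k := Nat.and_le_left
  omega

-- PySem.Int.band x (-x) = lowf |x| for x ≠ 0
theorem band_neg_self (x : Int) (hx : x ≠ 0) :
    PySem.Int.band x (-x) = (lowf x.natAbs : Int) := by
  unfold PySem.Int.band lowf
  rcases lt_or_gt_of_ne hx with hneg | hpos
  · have h1 : ¬ (0 ≤ x) := by omega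
    have h2 : 0 ≤ -x := by omega
    simp only [h1, h2, if_true, if_false]
    have e1 : (-x).toNat = x.natAbs := by omega
    have e2 : (-x - 1).toNat = x.natAbs - 1 := by omega
    rw [e1, e2]
  · have h1 : 0 ≤ x := by omega
    have h2 : ¬ (0 ≤ -x) := by omega
    simp only [h1, h2, if_true, if_false]
    have e1 : x.toNat = x.natAbs := by omega
    have e2 : (- -x - 1).toNat = x.natAbs - 1 := by omega
    rw [e1, e2]

-- loop invariant: 2^(result of A's loop) = 2^total * lowbit(w) * lowbit(h)
theorem cutLoopA_eq (fuel a b : Nat) (w h_ : Int) (total : Nat)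
    (hw : w ≠ 0) (hh : h_ ≠ 0)
    (hwa : w.natAbs < 2 ^ a) (hhb : h_.natAbs < 2 ^ b) (hf : a + b ≤ fuel) :
    (2 : Int) ^ (cutLoopA fuel w h_ total)
      = 2 ^ total * (PySem.Int.band w (-w) * PySem.Int.band h_ (-h_)) := by
  induction fuel generalizing a b w h_ total with
  | zero =>
      exfalso
      have ha : a = 0 := by omega
      have hb : b = 0 := by omega
      rw [ha] at hwa
      simp at hwa
      omega
  | succ fuel ih =>
      have hmod := PySem.Int.mod_eq_emod_of_pos (a := w) (b := 2) (by norm_num)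
      have hmodh := PySem.Int.mod_eq_emod_of_pos (a := h_) (b := 2) (by norm_num)
      by_cases hwe : w % 2 = 0
      · -- w even
        have hstep : cutLoopA (fuel + 1) w h_ total = cutLoopA fuel (w / 2) h_ (total + 1) := by
          simp [cutLoopA, hwe]
        have hw2 : w = 2 * (w / 2) := by omega
        have hw2ne : w / 2 ≠ 0 := by omega
        have hane : 2 ≤ w.natAbs := by omega
        have ha1 : 1 ≤ a := by
          by_contra hcon
          have : a = 0 := by omega
          rw [this] at hwa; simp at hwa; omega
        have hwa' : (w / 2).natAbs < 2 ^ (a - 1) := by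
          have h2a : 2 ^ a = 2 * 2 ^ (a - 1) := by
            conv_lhs => rw [show a = (a - 1) + 1 by omega]
            ring
          omega
        have hband : PySem.Int.band w (-w) = 2 * PySem.Int.band (w / 2) (-(w / 2)) := by
          rw [band_neg_self w hw, band_neg_self (w / 2) hw2ne]
          have hnat : w.natAbs = 2 * (w / 2).natAbs := by omega
          rw [hnat, lowf_even _ (by omega)]
          push_cast
          ring
        rw [hstep, ih (a - 1) b (w / 2) h_ (total + 1) hw2ne hh hwa' hhb (by omega), hband]
        ring
      · by_cases hhe : h_ % 2 = 0
        · -- w odd, h even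
          have hwodd : w % 2 = 1 := by omega
          have hstep : cutLoopA (fuel + 1) w h_ total = cutLoopA fuel w (h_ / 2) (total + 1) := by
            simp [cutLoopA, hwodd, hhe]
          have hh2ne : h_ / 2 ≠ 0 := by omega
          have hb1 : 1 ≤ b := by
            by_contra hcon
            have : b = 0 := by omega
            rw [this] at hhb; simp at hhb; omega
          have hhb' : (h_ / 2).natAbs < 2 ^ (b - 1) := by
            have h2b : 2 ^ b = 2 * 2 ^ (b - 1) := by
              conv_lhs => rw [show b = (b - 1) + 1 by omega]
              ring
            omega
          have hband : PySem.Int.band h_ (-h_) = 2 * PySem.Int.band (h_ / 2) (-(h_ / 2)) := by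
            rw [band_neg_self h_ hh, band_neg_self (h_ / 2) hh2ne]
            have hnat : h_.natAbs = 2 * (h_ / 2).natAbs := by omega
            rw [hnat, lowf_even _ (by omega)]
            push_cast
            ring
          rw [hstep, ih a (b - 1) w (h_ / 2) (total + 1) hw hh2ne hwa hhb' (by omega), hband]
          ring
        · -- both odd
          have hwodd : w % 2 = 1 := by omega
          have hhodd : h_ % 2 = 1 := by omega
          have hstep : cutLoopA (fuel + 1) w h_ total = total := by
            simp [cutLoopA, hwodd, hhodd]
          have hbw : PySem.Int.band w (-w) = 1 := by
            rw [band_neg_self w hw]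
            have : w.natAbs = 2 * (w.natAbs / 2) + 1 := by omega
            rw [this, lowf_odd]
            norm_num
          have hbh : PySem.Int.band h_ (-h_) = 1 := by
            rw [band_neg_self h_ hh]
            have : h_.natAbs = 2 * (h_.natAbs / 2) + 1 := by omega
            rw [this, lowf_odd]
            norm_num
          rw [hstep, hbw, hbh]
          ring

-- ===== VERDICT (by name: the statement is the Claim_ definition above) =====
theorem cut_total_spec : Claim_equal_cut_total := by
  intro w h_ n hdom hpre
  obtain ⟨hw, hh⟩ := hpre
  have hdw : w.natAbs < 2 ^ 32 := by
    unfold Dom_cut_total pvDomInt at hdom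
    simp only [Bool.and_eq_true, decide_eq_true_eq] at hdom
    omega
  have hdh : h_.natAbs < 2 ^ 32 := by
    unfold Dom_cut_total pvDomInt at hdom
    simp only [Bool.and_eq_true, decide_eq_true_eq] at hdom
    omega
  have hloop := cutLoopA_eq 64 32 32 w h_ 0 hw hh hdw hdh (by omega)
  unfold Spec_cut_total cut_total cut_total_alt
  simp only [pow_zero, one_mul] at hloop
  by_cases hs : PySem.Int.mod w 2 == 1 && PySem.Int.mod h_ 2 == 1 && n == 1
  · -- both odd and n = 1: A returns "YES" directly; B's pieces = 1 ≥ 1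
    simp only [hs, if_true]
    simp only [Bool.and_eq_true, beq_iff_eq] at hs
    obtain ⟨⟨hw1, hh1⟩, hn1⟩ := hs
    have hmod := PySem.Int.mod_eq_emod_of_pos (a := w) (b := 2) (by norm_num)
    have hmodh := PySem.Int.mod_eq_emod_of_pos (a := h_) (b := 2) (by norm_num)
    have hbw : PySem.Int.band w (-w) = 1 := by
      rw [band_neg_self w hw]
      have hwodd : w % 2 = 1 := by rw [hmod] at hw1; exact hw1
      have : w.natAbs = 2 * (w.natAbs / 2) + 1 := by omega
      rw [this, lowf_odd]
      norm_num
    have hbh : PySem.Int.band h_ (-h_) = 1 := by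
      rw [band_neg_self h_ hh]
      have hhodd : h_ % 2 = 1 := by rw [hmodh] at hh1; exact hh1
      have : h_.natAbs = 2 * (h_.natAbs / 2) + 1 := by omega
      rw [this, lowf_odd]
      norm_num
    rw [hn1, hbw, hbh]
    norm_num
  · simp only [hs, Bool.false_eq_true, if_false]
    rw [hloop]
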